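-- pv_equiv track=rewrite | github.com/benjaminpatrickevans/XAI | src/plotter.py | _flatten_constructed
-- ===== SOURCE A (Python) =====
-- def _flatten_constructed(idx, nodes, edges, labels):
--     """
--         Used for plotting, rather than a tree having a subtree
--         for a constructed feature, this gets flattened to a single
--         node.
--     :param idx:
--     :param nodes:
--     :param edges:
--     :param labels:
--     :return:
--     """
--     children = [child for (parent, child) in edges if parent == idx]
--
--     if not children:
--         return labels[idx], [idx]
--
--     replacements = {
--         "add": "+",
--         "subtract": "-",
--         "multiply": "*",
--         "divide": "/"
--     }
--
--     label = labels[idx]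
--     label = label.replace(label, replacements[label])
--
--     children_out = [_flatten_constructed(child, nodes, edges, labels) for child in children]
--
--     children_labels = [out[0] for out in children_out]
--     children_indices = [out[1] for out in children_out]
--
--     indices_to_remove = [idx]
--
--     # Add all the children index lists to our list
--     for children_idx_list in children_indices:
--         indices_to_remove.extend(children_idx_list)
--
--     # Return an updated label and the children nodes so we can remove them
--     return "(" + children_labels[0] + label + children_labels[1] + ")", indices_to_remove
-- ===== SOURCE B (Python) =====
-- def _flatten_constructed(idx, nodes, edges, labels):
--     # Alternative decomposition: build parent -> children adjacency once, then a single
--     # accumulator-passing traversal: indices are emitted into one shared preorder list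
--     # instead of concatenating per-subtree lists, and the operator comes from a direct
--     # dict lookup instead of label.replace.
--     adj = {}
--     for parent, child in edges:
--         adj[parent] = adj.get(parent, []) + [child]
--
--     replacements = {
--         "add": "+",
--         "subtract": "-",
--         "multiply": "*",
--         "divide": "/"
--     }
--
--     order = []
--
--     def go(n):
--         order.append(n)
--         kids = adj.get(n, [])
--         if not kids:
--             return labels[n]
--         op = replacements[labels[n]]
--         kid_labels = [go(k) for k in kids]
--         return "(" + kid_labels[0] + op + kid_labels[1] + ")"
--
--     label = go(idx)
--     return label, order
-- ===== Notes on version B (the rewrite author's own statement) =====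
-- stated objective: alternative
-- what changed: B builds a parent-to-children adjacency dict in one pass and does a single accumulator-passing traversal that emits indices into one shared preorder list and looks the operator up directly, instead of A's per-node scan of the whole edge list, per-subtree index-list concatenation and label.replace.
import Mathlib
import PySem

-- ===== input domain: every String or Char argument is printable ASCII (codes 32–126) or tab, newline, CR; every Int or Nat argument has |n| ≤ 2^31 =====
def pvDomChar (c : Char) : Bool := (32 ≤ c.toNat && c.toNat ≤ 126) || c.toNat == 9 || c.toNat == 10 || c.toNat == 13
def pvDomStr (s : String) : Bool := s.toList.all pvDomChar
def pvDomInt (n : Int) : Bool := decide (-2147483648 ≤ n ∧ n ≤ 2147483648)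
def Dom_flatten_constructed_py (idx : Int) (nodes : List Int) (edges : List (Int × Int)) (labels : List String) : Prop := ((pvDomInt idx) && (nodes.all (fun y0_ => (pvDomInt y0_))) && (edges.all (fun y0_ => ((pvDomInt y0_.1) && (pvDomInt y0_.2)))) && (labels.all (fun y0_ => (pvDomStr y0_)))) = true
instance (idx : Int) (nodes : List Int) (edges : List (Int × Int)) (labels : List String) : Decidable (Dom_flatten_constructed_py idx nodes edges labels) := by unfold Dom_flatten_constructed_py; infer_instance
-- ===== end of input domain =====

-- B replaces A's per-node scan of the edge list and per-subtree index-list concatenation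
-- by an adjacency dict built once plus one accumulator-passing preorder traversal (objective: alternative).


-- the replacements dict, shared module constant of both ports
def pyReplacements : PySem.Dict String String :=
  PySem.Dict.ofList [("add", "+"), ("subtract", "-"), ("multiply", "*"), ("divide", "/")]

-- ===== PORT A =====
-- literal port of A's recursion; fuel = edges.length + 1 bounds the recursion depth
-- (sufficient on every input Pre_ admits: acyclic, so a path repeats no node)
def flattenA (edges : List (Int × Int)) (labels : List String) : Nat → Int → String × List Int
  | 0, _ => ("", [])   -- fuel exhausted; unreachable under Pre_
  | fuel + 1, idx =>
    let children := (edges.filter (fun pc => pc.1 == idx)).map (·.2)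
    if children = [] then
      ((PySem.List.pyGet? labels idx).getD "", [idx])   -- none = IndexError, excluded by Pre_
    else
      let label := (PySem.List.pyGet? labels idx).getD ""
      let label := PySem.Str.replace label label ((pyReplacements.get? label).getD "")   -- none = KeyError, excluded by Pre_
      let childrenOut := children.map (fun child => flattenA edges labels fuel child)
      let childrenLabels := childrenOut.map (·.1)
      let childrenIndices := childrenOut.map (·.2)
      let indicesToRemove := childrenIndices.foldl (fun acc l => acc ++ l) [idx]
      ("(" ++ (PySem.List.pyGet? childrenLabels 0).getD "" ++ label ++
         (PySem.List.pyGet? childrenLabels 1).getD "" ++ ")",   -- none = IndexError, excluded by Pre_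
       indicesToRemove)

def flatten_constructed_py (idx : Int) (nodes : List Int) (edges : List (Int × Int)) (labels : List String) : String × List Int :=
  flattenA edges labels (edges.length + 1) idx

-- ===== PORT B =====
-- port of Source B: adjacency dict built once; go threads the shared `order` accumulator
def flattenB_go (adj : PySem.Dict Int (List Int)) (labels : List String) : Nat → Int → List Int → String × List Int
  | 0, _, order => ("", order)   -- fuel exhausted; unreachable under Pre_
  | fuel + 1, n, order =>
    let order := order ++ [n]
    let kids := adj.getD n []
    if kids = [] then
      ((PySem.List.pyGet? labels n).getD "", order)
    else
      let op := (pyReplacements.get? ((PySem.List.pyGet? labels n).getD "")).getD ""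
      let p := kids.foldl
        (fun (p : List String × List Int) k =>
          let r := flattenB_go adj labels fuel k p.2
          (p.1 ++ [r.1], r.2)) ([], order)
      ("(" ++ (PySem.List.pyGet? p.1 0).getD "" ++ op ++ (PySem.List.pyGet? p.1 1).getD "" ++ ")", p.2)

def flatten_constructed_py_alt (idx : Int) (nodes : List Int) (edges : List (Int × Int)) (labels : List String) : String × List Int :=
  let adj := edges.foldl (fun d pc => d.modify pc.1 [] (· ++ [pc.2])) PySem.Dict.empty
  let r := flattenB_go adj labels (edges.length + 1) idx []
  (r.1, r.2)

-- ===== PRECONDITION & SPEC =====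
-- helpers for Pre_: plain graph reachability from idx along the edge relation
def pvChildren (edges : List (Int × Int)) (n : Int) : List Int :=
  (edges.filter (fun pc => pc.1 == n)).map (·.2)

def pvReach (edges : List (Int × Int)) (start : List Int) : List Int :=
  (fun S => (S ++ S.flatMap (pvChildren edges)).dedup)^[edges.length + 1] start

-- Pre_: exactly the inputs on which Python A returns normally — every node reachable from
-- idx is a valid index into labels, no reachable node lies on a cycle (else infinite
-- recursion), and every reachable internal node has a label in the replacements dict
-- (else KeyError) and at least two children (else IndexError on children_labels[1]).
def Pre_flatten_constructed_py (idx : Int) (nodes : List Int) (edges : List (Int × Int)) (labels : List String) : Prop :=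
  ∀ n ∈ pvReach edges [idx],
    (PySem.List.pyGet? labels n).isSome = true ∧
    n ∉ pvReach edges (pvChildren edges n) ∧
    (pvChildren edges n ≠ [] →
      (PySem.List.pyGet? labels n).getD "" ∈ (["add", "subtract", "multiply", "divide"] : List String) ∧
      2 ≤ (pvChildren edges n).length)

instance (idx : Int) (nodes : List Int) (edges : List (Int × Int)) (labels : List String) : Decidable (Pre_flatten_constructed_py idx nodes edges labels) := by
  unfold Pre_flatten_constructed_py; infer_instance

def pvWitness_flatten_constructed_py : Int × List Int × (List (Int × Int)) × List String :=
  (0, [0, 1, 2], [(0, 1), (0, 2)], ["add", "x", "y"])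

def Spec_flatten_constructed_py (idx : Int) (nodes : List Int) (edges : List (Int × Int)) (labels : List String) (out : String × List Int) : Prop := out = flatten_constructed_py_alt idx nodes edges labels
instance (idx : Int) (nodes : List Int) (edges : List (Int × Int)) (labels : List String) (out : String × List Int) : Decidable (Spec_flatten_constructed_py idx nodes edges labels out) := by unfold Spec_flatten_constructed_py; infer_instance

-- ===== CLAIM (what is proved, stated in full; the proofs are below) =====
def Claim_equal_flatten_constructed_py : Prop := ∀ (idx : Int) (nodes : List Int) (edges : List (Int × Int)) (labels : List String), Dom_flatten_constructed_py idx nodes edges labels → Pre_flatten_constructed_py idx nodes edges labels → Spec_flatten_constructed_py idx nodes edges labels (flatten_constructed_py idx nodes edges labels)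

-- ===== LEMMAS AND PROOFS =====

theorem pv_replace_self (s t : String) : PySem.Str.replace s s t = t := by
  unfold PySem.Str.replace
  cases h : s.toList with
  | nil => simp [PySem.Chars.replace]
  | cons c cs =>
    cases cs with
    | nil => simp [PySem.Chars.replace, PySem.Chars.replace.go, List.isPrefixOf]
    | cons c2 cs2 => simp [PySem.Chars.replace, PySem.Chars.replace.go, List.isPrefixOf]

theorem pv_adj_getD (edges : List (Int × Int)) (n : Int) :
    ((edges.foldl (fun d pc => d.modify pc.1 [] (· ++ [pc.2])) PySem.Dict.empty).getD n []) =
      (edges.filter (fun pc => pc.1 == n)).map (·.2) := by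
  simp [PySem.Dict.getD_foldl_modify_append]

theorem pv_foldl_append (L : List (List Int)) (init : List Int) :
    L.foldl (fun acc l => acc ++ l) init = init ++ L.flatten := by
  induction L generalizing init with
  | nil => simp
  | cons l L ih => simp [List.foldl_cons, ih, List.append_assoc]

theorem pv_fold_pair_pure (g : Int → String × List Int) :
    ∀ (kids : List Int) (ls : List String) (ord : List Int),
      kids.foldl (fun (p : List String × List Int) k => (p.1 ++ [(g k).1], p.2 ++ (g k).2)) (ls, ord)
        = (ls ++ kids.map (fun k => (g k).1), ord ++ (kids.map (fun k => (g k).2)).flatten) := by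
  intro kids
  induction kids with
  | nil => intro ls ord; simp
  | cons k ks ihk =>
    intro ls ord
    rw [List.foldl_cons]
    simp only [ihk]
    simp

theorem pv_fold_pair (f : Int → List Int → String × List Int) (g : Int → String × List Int)
    (h : ∀ k ord, f k ord = ((g k).1, ord ++ (g k).2)) :
    ∀ (kids : List Int) (ls : List String) (ord : List Int),
      kids.foldl (fun (p : List String × List Int) k => let r := f k p.2; (p.1 ++ [r.1], r.2)) (ls, ord)
        = (ls ++ kids.map (fun k => (g k).1), ord ++ (kids.map (fun k => (g k).2)).flatten) := by
  intro kids ls ord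
  simp only [h]
  exact pv_fold_pair_pure g kids ls ord

theorem pv_go_eq (edges : List (Int × Int)) (labels : List String) :
    ∀ (fuel : Nat) (n : Int) (order : List Int),
      flattenB_go (edges.foldl (fun d pc => d.modify pc.1 [] (· ++ [pc.2])) PySem.Dict.empty) labels fuel n order =
        ((flattenA edges labels fuel n).1, order ++ (flattenA edges labels fuel n).2) := by
  intro fuel
  induction fuel with
  | zero => intro n order; simp [flattenA, flattenB_go]
  | succ fuel ih =>
    intro n order
    have hfold := pv_fold_pair
      (flattenB_go (edges.foldl (fun d pc => d.modify pc.1 [] (· ++ [pc.2])) PySem.Dict.empty) labels fuel)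
      (flattenA edges labels fuel) ih
    simp only [flattenA, flattenB_go, pv_adj_getD]
    split_ifs with hc
    · simp
    · simp only [hfold, List.nil_append, pv_replace_self, pv_foldl_append, List.map_map,
        Function.comp_def, List.singleton_append, List.append_assoc]

-- ===== VERDICT (by name: the statement is the Claim_ definition above) =====
theorem flatten_constructed_py_spec : Claim_equal_flatten_constructed_py := by
  intro idx nodes edges labels _ _
  unfold Spec_flatten_constructed_py flatten_constructed_py flatten_constructed_py_alt
  simp [pv_go_eq]
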